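-- pv_equiv track=rewrite | github.com/mithuleshkurale/ML4T_PR8 | StrategyLearner.py | determineBestPositions
-- ===== SOURCE A (Python) =====
-- def determineBestPositions(positions):
--     best_pos = {}
--     for pos in positions:
--         cash_holding = pos[0]
--         net_holdings = pos[1]
--         # update the record if new cash val for existing net holdings is greater
--         if net_holdings in best_pos and cash_holding > best_pos[net_holdings][0]:
--             best_pos[net_holdings] = pos
--         elif net_holdings not in best_pos:
--             best_pos[net_holdings] = pos
--
--     return list(best_pos.values())
-- ===== SOURCE B (Python) =====
-- def determineBestPositions(positions):
--     # group positions by net_holdings (first-appearance key order), then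
--     # reduce each group with max (first maximal element = earliest on ties)
--     groups = {}
--     for pos in positions:
--         groups.setdefault(pos[1], []).append(pos)
--     return [max(group, key=lambda p: p[0]) for group in groups.values()]
-- ===== Notes on version B (the rewrite author's own statement) =====
-- stated objective: alternative
-- what changed: Replaces A's running in-place best-per-key update with a group-then-reduce shape: one pass building a dict of per-net_holdings groups, then max(group, key=cash) per group.
import Mathlib
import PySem

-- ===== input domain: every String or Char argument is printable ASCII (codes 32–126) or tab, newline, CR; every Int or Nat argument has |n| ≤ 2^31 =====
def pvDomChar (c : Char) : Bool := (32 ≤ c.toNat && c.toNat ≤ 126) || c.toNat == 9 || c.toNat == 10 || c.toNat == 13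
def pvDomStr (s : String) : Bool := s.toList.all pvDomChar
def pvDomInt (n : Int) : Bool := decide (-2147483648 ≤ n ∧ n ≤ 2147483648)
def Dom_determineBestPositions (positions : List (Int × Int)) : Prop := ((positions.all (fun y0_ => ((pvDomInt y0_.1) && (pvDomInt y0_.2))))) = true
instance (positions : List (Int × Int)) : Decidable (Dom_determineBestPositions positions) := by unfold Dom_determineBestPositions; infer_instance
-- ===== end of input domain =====

-- B replaces A's running in-place best-per-key update by a group-by-key pass followed by a
-- per-group max (first maximal element); same cost, different decomposition.


-- ===== PORT A =====
-- the getD default (0, 0) is never the value used: the branch reads best_pos[net] only when contains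
def determineBestPositions (positions : List (Int × Int)) : List (Int × Int) :=
  (positions.foldl
    (fun best_pos pos =>
      if best_pos.contains pos.2 ∧ pos.1 > (best_pos.getD pos.2 (0, 0)).1 then
        best_pos.insert pos.2 pos
      else if ¬ best_pos.contains pos.2 then
        best_pos.insert pos.2 pos
      else
        best_pos)
    PySem.Dict.empty).values

-- ===== PORT B =====
-- groups.setdefault(pos[1], []).append(pos) = modify pos.2 [] (· ++ [pos]);
-- Python max raises on []: every group is nonempty by construction, so max? is always some and
-- filterMap drops nothing (exactly the list comprehension over groups.values())
def determineBestPositions_alt (positions : List (Int × Int)) : List (Int × Int) :=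
  let groups := positions.foldl
    (fun g pos => g.modify pos.2 [] (fun grp => grp ++ [pos])) PySem.Dict.empty
  groups.values.filterMap (fun grp => PySem.List.max? grp (fun p => p.1))

-- ===== PRECONDITION & SPEC =====
def Spec_determineBestPositions (positions : List (Int × Int)) (out : List (Int × Int)) : Prop := out = determineBestPositions_alt positions
instance (positions : List (Int × Int)) (out : List (Int × Int)) : Decidable (Spec_determineBestPositions positions out) := by unfold Spec_determineBestPositions; infer_instance

-- ===== CLAIM (what is proved, stated in full; the proofs are below) =====
def Claim_equal_determineBestPositions : Prop := ∀ (positions : List (Int × Int)), Dom_determineBestPositions positions → Spec_determineBestPositions positions (determineBestPositions positions)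

-- ===== LEMMAS AND PROOFS =====

-- the value B's per-group max produces, as a total function (groups are nonempty)
def bestOf (grp : List (Int × Int)) : Int × Int :=
  (PySem.List.max? grp (fun p => p.1)).getD (0, 0)

def stepA (d : PySem.Dict Int (Int × Int)) (pos : Int × Int) : PySem.Dict Int (Int × Int) :=
  if d.contains pos.2 ∧ pos.1 > (d.getD pos.2 (0, 0)).1 then d.insert pos.2 pos
  else if ¬ d.contains pos.2 then d.insert pos.2 pos
  else d

def stepB (g : PySem.Dict Int (List (Int × Int))) (pos : Int × Int) : PySem.Dict Int (List (Int × Int)) :=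
  g.modify pos.2 [] (fun grp => grp ++ [pos])

-- the invariant tying A's dict to B's dict of groups
def BDInv (d : PySem.Dict Int (Int × Int)) (g : PySem.Dict Int (List (Int × Int))) : Prop :=
  d.items = g.items.map (fun p => (p.1, bestOf p.2)) ∧ (∀ p ∈ g.items, p.2 ≠ []) ∧ g.keys.Nodup

theorem max?_append_singleton (grp : List (Int × Int)) (x : Int × Int) :
    PySem.List.max? (grp ++ [x]) (fun p => p.1)
      = match PySem.List.max? grp (fun p => p.1) with
        | none => some x
        | some m => if m.1 < x.1 then some x else some m := by
  unfold PySem.List.max?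
  rw [List.foldl_append]
  generalize List.foldl _ none grp = acc
  cases acc <;> simp

theorem max?_of_ne_nil (grp : List (Int × Int)) (h : grp ≠ []) :
    PySem.List.max? grp (fun p => p.1) = some (bestOf grp) := by
  cases hm : PySem.List.max? grp (fun p => p.1) with
  | none => exact absurd ((PySem.List.max?_eq_none_iff grp _).mp hm) h
  | some m => simp [bestOf, hm]

theorem bestOf_singleton (x : Int × Int) : bestOf [x] = x := by
  simp [bestOf, PySem.List.max?]

theorem bestOf_append_singleton (grp : List (Int × Int)) (x : Int × Int) (h : grp ≠ []) :
    bestOf (grp ++ [x]) = if (bestOf grp).1 < x.1 then x else bestOf grp := by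
  rw [bestOf, max?_append_singleton, max?_of_ne_nil grp h]
  show (if (bestOf grp).1 < x.1 then some x else some (bestOf grp)).getD (0, 0) = _
  split <;> rfl

theorem inv_step (d : PySem.Dict Int (Int × Int)) (g : PySem.Dict Int (List (Int × Int)))
    (pos : Int × Int) (h : BDInv d g) : BDInv (stepA d pos) (stepB g pos) := by
  obtain ⟨hitems, hne, hnd⟩ := h
  have hkeys : d.keys = g.keys := by
    simp only [PySem.Dict.keys, hitems, List.map_map]; rfl
  have hdnd : d.keys.Nodup := hkeys ▸ hnd
  have hcont : d.contains pos.2 = g.contains pos.2 := by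
    rw [PySem.Dict.contains_eq_decide_mem_keys, PySem.Dict.contains_eq_decide_mem_keys, hkeys]
  simp only [stepA, stepB, PySem.Dict.modify]
  cases hc : g.contains pos.2 with
  | false =>
    rw [PySem.Dict.getD_of_not_contains _ _ hc]
    rw [if_neg (by simp [hcont, hc]), if_pos (by simp [hcont, hc])]
    refine ⟨?_, ?_, ?_⟩
    · rw [PySem.Dict.items_insert_of_not_contains _ _ (hcont.trans hc),
          PySem.Dict.items_insert_of_not_contains _ _ hc]
      simp [hitems, bestOf_singleton]
    · intro p hp
      rcases (List.mem_append.mp ((PySem.Dict.items_insert_of_not_contains _ _ hc) ▸ hp)) with h1 | h1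
      · exact hne p h1
      · simp at h1; simp [h1]
    · rw [PySem.Dict.keys_insert_of_not_contains _ _ hc]
      refine List.Nodup.append hnd (List.nodup_singleton _) ?_
      intro a ha hb
      simp at hb; subst hb
      have : g.contains pos.2 = true := by
        rw [PySem.Dict.contains_eq_decide_mem_keys]; simpa using ha
      simp [hc] at this
  | true =>
    obtain ⟨grp, hget⟩ : ∃ v, g.get? pos.2 = some v := by
      have := PySem.Dict.contains_eq_isSome_get? g pos.2
      rw [hc] at this
      exact Option.isSome_iff_exists.mp this.symm
    have hgetD : g.getD pos.2 [] = grp := PySem.Dict.getD_of_get?_eq_some _ _ hget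
    have hmem : (pos.2, grp) ∈ g.items := PySem.Dict.mem_items_of_get?_eq_some _ hget
    have hgrpne : grp ≠ [] := hne _ hmem
    have hdmem : (pos.2, bestOf grp) ∈ d.items := by
      rw [hitems]; exact List.mem_map_of_mem hmem
    have hdgetD : d.getD pos.2 (0, 0) = bestOf grp :=
      PySem.Dict.getD_of_mem_items _ hdmem hdnd _
    have huniq : ∀ p ∈ g.items, p.1 = pos.2 → p = (pos.2, grp) := by
      intro p hp hpk
      have : g.get? pos.2 = some p.2 :=
        (PySem.Dict.get?_eq_some_iff_mem_items g pos.2 p.2 hnd).mpr (by rw [← hpk]; exact hp)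
      rw [hget] at this
      obtain rfl : grp = p.2 := by injection this
      exact Prod.ext hpk rfl
    rw [hgetD]
    by_cases hgt : (bestOf grp).1 < pos.1
    · rw [if_pos ⟨hcont.trans hc, by rw [hdgetD]; exact hgt⟩]
      refine ⟨?_, ?_, ?_⟩
      · rw [PySem.Dict.items_insert_of_contains _ _ (hcont.trans hc),
            PySem.Dict.items_insert_of_contains _ _ hc, hitems, List.map_map, List.map_map]
        refine List.map_congr_left ?_
        intro p hp
        simp only [Function.comp]
        by_cases hk : p.1 = pos.2
        · have hp2 : p = (pos.2, grp) := huniq p hp hk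
          subst hp2
          simp [bestOf_append_singleton _ _ hgrpne, hgt]
        · simp [hk]
      · intro p hp
        rw [PySem.Dict.items_insert_of_contains _ _ hc] at hp
        obtain ⟨q, hq, rfl⟩ := List.mem_map.mp hp
        by_cases hk : q.1 = pos.2
        · simp [hk]
        · simp [hk]; exact hne q hq
      · rw [PySem.Dict.keys_insert_of_contains _ _ hc]; exact hnd
    · rw [if_neg (by rw [hdgetD]; exact fun ⟨_, h2⟩ => hgt h2),
          if_neg (by simp [hcont, hc])]
      refine ⟨?_, ?_, ?_⟩
      · rw [PySem.Dict.items_insert_of_contains _ _ hc, hitems, List.map_map]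
        refine List.map_congr_left ?_
        intro p hp
        simp only [Function.comp]
        by_cases hk : p.1 = pos.2
        · have hp2 : p = (pos.2, grp) := huniq p hp hk
          subst hp2
          simp [bestOf_append_singleton _ _ hgrpne, hgt]
        · simp [hk]
      · intro p hp
        rw [PySem.Dict.items_insert_of_contains _ _ hc] at hp
        obtain ⟨q, hq, rfl⟩ := List.mem_map.mp hp
        by_cases hk : q.1 = pos.2
        · simp [hk]
        · simp [hk]; exact hne q hq
      · rw [PySem.Dict.keys_insert_of_contains _ _ hc]; exact hnd

theorem inv_fold (l : List (Int × Int)) (d : PySem.Dict Int (Int × Int))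
    (g : PySem.Dict Int (List (Int × Int))) (h : BDInv d g) :
    BDInv (l.foldl stepA d) (l.foldl stepB g) := by
  induction l generalizing d g with
  | nil => exact h
  | cons x t ih => exact ih _ _ (inv_step d g x h)

-- ===== VERDICT (by name: the statement is the Claim_ definition above) =====
theorem determineBestPositions_spec : Claim_equal_determineBestPositions := by
  intro positions _
  show (positions.foldl stepA PySem.Dict.empty).values
      = ((positions.foldl stepB PySem.Dict.empty).values).filterMap
          (fun grp => PySem.List.max? grp (fun p => p.1))
  obtain ⟨hitems, hne, _⟩ :=
    inv_fold positions PySem.Dict.empty PySem.Dict.empty ⟨rfl, by simp [PySem.Dict.empty], by simp [PySem.Dict.empty, PySem.Dict.keys]⟩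
  simp only [PySem.Dict.values, hitems, List.map_map, List.filterMap_map, Function.comp]
  have hfm := List.filterMap_congr
    (l := (List.foldl stepB PySem.Dict.empty positions).items)
    (f := fun p : Int × List (Int × Int) => PySem.List.max? p.2 (fun q => q.1))
    (g := fun p : Int × List (Int × Int) => some (bestOf p.2))
    (fun p hp => max?_of_ne_nil p.2 (hne p hp))
  rw [hfm, show (fun p : Int × List (Int × Int) => some (bestOf p.2))
        = some ∘ (fun p : Int × List (Int × Int) => bestOf p.2) from rfl,
      List.filterMap_eq_map]
  rfl
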